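-- pv_equiv track=rewrite | github.com/DrMikeMaik/GOTCHA | text_noise_video_defense.py | build_overlap_cycle_schedule
-- ===== SOURCE A (Python) =====
-- def build_overlap_cycle_schedule(
--     groups: list[int],
--     active_count: int,
--     step_count: int,
--     schedule_span: int,
-- ) -> list[tuple[int, ...]]:
--     if not groups:
--         return [tuple()] * step_count
--     if active_count >= len(groups):
--         return [tuple(groups)] * step_count
--
--     hidden_count = len(groups) - active_count
--     if hidden_count != 2:
--         raise SystemExit("--schedule-mode overlap_cycle currently requires exactly two hidden groups per frame.")
--
--     cycle: list[tuple[int, ...]] = []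
--     for index in range(len(groups)):
--         hidden_groups = {groups[index], groups[(index + 1) % len(groups)]}
--         active_groups = tuple(group for group in groups if group not in hidden_groups)
--         cycle.extend([active_groups] * schedule_span)
--
--     schedule: list[tuple[int, ...]] = []
--     while len(schedule) < step_count:
--         schedule.extend(cycle)
--     return schedule[:step_count]
-- ===== SOURCE B (Python) =====
-- def build_overlap_cycle_schedule(
--     groups: list[int],
--     active_count: int,
--     step_count: int,
--     schedule_span: int,
-- ) -> list[tuple[int, ...]]:
--     if not groups:
--         return [tuple()] * step_count
--     if active_count >= len(groups):
--         return [tuple(groups)] * step_count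
--
--     if len(groups) - active_count != 2:
--         raise SystemExit("--schedule-mode overlap_cycle currently requires exactly two hidden groups per frame.")
--
--     n = len(groups)
--     cache = []
--     for i in range(n):
--         hidden = {groups[i], groups[(i + 1) % n]}
--         cache.append(tuple(g for g in groups if g not in hidden))
--     return [cache[(j // schedule_span) % n] for j in range(step_count)]
-- ===== Notes on version B (the rewrite author's own statement) =====
-- stated objective: alternative
-- what changed: Replaces the build-whole-cycle-then-tile-with-a-while-loop-and-slice construction by a per-group-index cache plus a single index-driven pass computing each step's tuple as cache[(j // schedule_span) % n], never materialising the tiled overshoot.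
import Mathlib
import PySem

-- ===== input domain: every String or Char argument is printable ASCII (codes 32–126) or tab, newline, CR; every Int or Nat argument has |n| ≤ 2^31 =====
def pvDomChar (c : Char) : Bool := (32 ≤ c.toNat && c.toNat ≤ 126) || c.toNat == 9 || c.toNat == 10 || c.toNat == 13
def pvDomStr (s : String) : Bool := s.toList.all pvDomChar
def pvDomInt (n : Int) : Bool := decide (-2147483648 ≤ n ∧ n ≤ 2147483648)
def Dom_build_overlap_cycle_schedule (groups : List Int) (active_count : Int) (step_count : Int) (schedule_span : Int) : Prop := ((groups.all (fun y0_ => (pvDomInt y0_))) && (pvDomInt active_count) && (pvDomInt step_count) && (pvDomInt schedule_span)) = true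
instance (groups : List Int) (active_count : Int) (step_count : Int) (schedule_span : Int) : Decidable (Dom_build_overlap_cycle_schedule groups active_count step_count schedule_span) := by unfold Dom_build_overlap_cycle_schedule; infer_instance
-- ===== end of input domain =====

-- B replaces A's build-the-whole-cycle-then-tile-and-slice construction by a per-group-index
-- cache and one index-driven pass: step j is cache[(j // schedule_span) % n]. Same values.

-- ===== PORT A =====
-- the 'while len(schedule) < step_count: schedule.extend(cycle)' loop; each iteration appends
-- cycle. Fuel step_count.toNat + 1 is enough whenever cycle ≠ [] (each pass adds ≥ 1 element);
-- inputs where the Python loop never terminates (cycle = [] and step_count > 0) are outside Pre_.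
def buildOverlapWhile (cycle : List (List Int)) (step_count : Int) : List (List Int) → Nat → List (List Int)
  | schedule, 0 => schedule
  | schedule, fuel + 1 =>
      if (schedule.length : Int) < step_count then
        buildOverlapWhile cycle step_count (schedule ++ cycle) fuel
      else schedule

def build_overlap_cycle_schedule (groups : List Int) (active_count : Int) (step_count : Int) (schedule_span : Int) : List (List Int) :=
  if groups = [] then List.replicate step_count.toNat ([] : List Int)  -- [t]*k is [] for k < 0, toNat is exact
  else if active_count ≥ (groups.length : Int) then List.replicate step_count.toNat groups
  else if ((groups.length : Int) - active_count) ≠ 2 then []  -- Python: raise SystemExit; outside Pre_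
  else
    let n := groups.length
    let cycle := (List.range n).foldl (fun acc index =>
      let hidden : PySem.Set Int := PySem.Set.ofList [groups.getD index 0, groups.getD ((index + 1) % n) 0]  -- indices in range, getD exact
      let active_groups := groups.filter (fun g => !(PySem.Set.contains hidden g))
      acc ++ List.replicate schedule_span.toNat active_groups) []  -- [t]*span is [] for span < 0
    let schedule := buildOverlapWhile cycle step_count [] (step_count.toNat + 1)
    PySem.List.slice schedule none (some step_count)

-- ===== PORT B =====
def build_overlap_cycle_schedule_alt (groups : List Int) (active_count : Int) (step_count : Int) (schedule_span : Int) : List (List Int) :=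
  if groups = [] then List.replicate step_count.toNat ([] : List Int)
  else if active_count ≥ (groups.length : Int) then List.replicate step_count.toNat groups
  else if ((groups.length : Int) - active_count) ≠ 2 then []  -- Python: raise SystemExit; outside Pre_
  else
    let n := groups.length
    let cache := (List.range n).map (fun i =>
      let hidden : PySem.Set Int := PySem.Set.ofList [groups.getD i 0, groups.getD ((i + 1) % n) 0]
      groups.filter (fun g => !(PySem.Set.contains hidden g)))
    (List.range step_count.toNat).map (fun (j : Nat) =>
      -- cache[(j // schedule_span) % n]: with schedule_span > 0 (Pre_) the index is in [0, n)
      cache.getD (PySem.Int.mod (PySem.Int.floordiv (j : Int) schedule_span) (n : Int)).toNat [])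

-- ===== PRECONDITION & SPEC =====
-- Pre_ excludes exactly the inputs where the Python A does not return: hidden_count ≠ 2 on the
-- main path (A raises SystemExit, B raises it too) and schedule_span ≤ 0 with step_count > 0 on
-- the main path (A's while loop never terminates).
def Pre_build_overlap_cycle_schedule (groups : List Int) (active_count : Int) (step_count : Int) (schedule_span : Int) : Prop :=
  groups = [] ∨ (groups.length : Int) ≤ active_count ∨
    ((groups.length : Int) - active_count = 2 ∧ (0 < schedule_span ∨ step_count ≤ 0))
instance (groups : List Int) (active_count : Int) (step_count : Int) (schedule_span : Int) : Decidable (Pre_build_overlap_cycle_schedule groups active_count step_count schedule_span) := by unfold Pre_build_overlap_cycle_schedule; infer_instance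

def pvWitness_build_overlap_cycle_schedule : List Int × Int × Int × Int := ([1, 2, 3], 1, 5, 2)

def Spec_build_overlap_cycle_schedule (groups : List Int) (active_count : Int) (step_count : Int) (schedule_span : Int) (out : List (List Int)) : Prop := out = build_overlap_cycle_schedule_alt groups active_count step_count schedule_span
instance (groups : List Int) (active_count : Int) (step_count : Int) (schedule_span : Int) (out : List (List Int)) : Decidable (Spec_build_overlap_cycle_schedule groups active_count step_count schedule_span out) := by unfold Spec_build_overlap_cycle_schedule; infer_instance

-- ===== CLAIM (what is proved, stated in full; the proofs are below) =====
def Claim_equal_build_overlap_cycle_schedule : Prop := ∀ (groups : List Int) (active_count : Int) (step_count : Int) (schedule_span : Int), Dom_build_overlap_cycle_schedule groups active_count step_count schedule_span → Pre_build_overlap_cycle_schedule groups active_count step_count schedule_span → Spec_build_overlap_cycle_schedule groups active_count step_count schedule_span (build_overlap_cycle_schedule groups active_count step_count schedule_span)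

-- ===== LEMMAS AND PROOFS =====

theorem pv_flatMap_replicate_length (f : Nat → List Int) (n s : Nat) :
    ((List.range n).flatMap (fun i => List.replicate s (f i))).length = n * s := by
  induction n with
  | zero => simp
  | succ n ih => simp [List.range_succ, ih]; ring

theorem pv_flatMap_replicate_getElem (f : Nat → List Int) (n s p : Nat) (hp : p < n * s) :
    ((List.range n).flatMap (fun i => List.replicate s (f i)))[p]? = some (f (p / s)) := by
  induction n with
  | zero => omega
  | succ n ih =>
    have hexp : (n + 1) * s = n * s + s := by ring
    rw [List.range_succ, List.flatMap_append]
    by_cases h : p < n * s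
    · rw [List.getElem?_append_left (by rw [pv_flatMap_replicate_length]; exact h)]
      exact ih h
    · rw [List.getElem?_append_right (by rw [pv_flatMap_replicate_length]; omega)]
      rw [pv_flatMap_replicate_length]
      have hs : 0 < s := by by_contra hs; omega
      have hdiv : p / s = n := Nat.div_eq_of_lt_le (by omega) (by omega)
      have hlt : p - n * s < s := by omega
      simp [hlt, hdiv]

theorem pv_flatten_replicate_length (c : List (List Int)) (m : Nat) :
    ((List.replicate m c).flatten).length = m * c.length := by
  induction m with
  | zero => simp
  | succ m ih => simp [List.replicate_succ, ih]; ring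

theorem pv_flatten_replicate_getElem (c : List (List Int)) (m j : Nat) (hj : j < m * c.length) :
    ((List.replicate m c).flatten)[j]? = getElem? c (j % c.length) := by
  induction m generalizing j with
  | zero => omega
  | succ m ih =>
    have hmul : (m + 1) * c.length = m * c.length + c.length := by ring
    rw [List.replicate_succ, List.flatten_cons]
    by_cases h : j < c.length
    · rw [List.getElem?_append_left h, Nat.mod_eq_of_lt h]
    · rw [List.getElem?_append_right (by omega)]
      have h1 : j - c.length < m * c.length := by omega
      rw [ih _ h1]
      congr 1
      have : j = (j - c.length) + c.length := by omega
      conv_rhs => rw [this]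
      rw [Nat.add_mod_right]

theorem pv_while_spec (c : List (List Int)) (hc : c ≠ []) (t : Nat) :
    ∀ (fuel : Nat) (s : List (List Int)), t ≤ s.length + fuel →
      ∃ m, buildOverlapWhile c (t : Int) s fuel = s ++ (List.replicate m c).flatten ∧
        t ≤ (s ++ (List.replicate m c).flatten).length := by
  intro fuel
  induction fuel with
  | zero =>
    intro s hs
    refine ⟨0, ?_, ?_⟩
    · simp [buildOverlapWhile]
    · simpa using hs
  | succ fuel ih =>
    intro s hs
    by_cases h : s.length < t
    · have hcl : 1 ≤ c.length := by
        cases c with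
        | nil => exact absurd rfl hc
        | cons a l => simp
      obtain ⟨m, hm, hlen⟩ := ih (s ++ c) (by simp; omega)
      have hmul : (m + 1) * c.length = m * c.length + c.length := by ring
      refine ⟨m + 1, ?_, ?_⟩
      · rw [buildOverlapWhile, if_pos (show ((s.length : Int) < (t : Int)) from by exact_mod_cast h)]
        rw [hm, List.replicate_succ, List.flatten_cons, List.append_assoc]
      · simp at hlen ⊢; omega
    · refine ⟨0, ?_, by simp; omega⟩
      rw [buildOverlapWhile]
      rw [if_neg (show ¬ ((s.length : Int) < (t : Int)) from by exact_mod_cast h)]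
      simp

theorem pv_main_branch (groups : List Int) (step_count : Int) (schedule_span : Int)
    (f : Nat → List Int) (hg : groups ≠ []) (hspan : 0 < schedule_span ∨ step_count ≤ 0) :
    PySem.List.slice
      (buildOverlapWhile
        ((List.range groups.length).foldl (fun acc index => acc ++ List.replicate schedule_span.toNat (f index)) [])
        step_count [] (step_count.toNat + 1)) none (some step_count)
    = (List.range step_count.toNat).map (fun (j : Nat) =>
        ((List.range groups.length).map f).getD
          (PySem.Int.mod (PySem.Int.floordiv (j : Int) schedule_span) (groups.length : Int)).toNat []) := by
  set n := groups.length with hn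
  have hn0 : 0 < n := by cases groups with | nil => exact absurd rfl hg | cons a l => simp [hn]
  set c := (List.range n).foldl (fun acc index => acc ++ List.replicate schedule_span.toNat (f index)) [] with hcdef
  have hc : c = (List.range n).flatMap (fun i => List.replicate schedule_span.toNat (f i)) := by
    rw [hcdef, PySem.List.foldl_append_eq_flatMap]; simp
  by_cases hstep : step_count ≤ 0
  · -- loop body never runs, both sides are []
    have ht : step_count.toNat = 0 := by omega
    rw [ht]
    rw [show buildOverlapWhile c step_count [] (0 + 1) = [] from by
      rw [buildOverlapWhile]; simp; omega]
    simp [PySem.List.slice]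
  · have hspan' : 0 < schedule_span := by tauto
    set s := schedule_span.toNat with hsdef
    have hs0 : 0 < s := by omega
    set k := step_count.toNat with hkdef
    have hk : step_count = (k : Int) := by omega
    have hclen : c.length = n * s := by rw [hc]; exact pv_flatMap_replicate_length f n s
    have hcne : c ≠ [] := by
      intro h; rw [h] at hclen; simp at hclen
      rcases hclen with h1 | h1 <;> omega
    obtain ⟨m, hm, hlen⟩ := pv_while_spec c hcne k (k + 1) [] (by simp)
    rw [hk, hm]
    simp only [List.nil_append] at *
    rw [pv_flatten_replicate_length] at hlen
    rw [PySem.List.slice_to_natCast]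
    apply List.ext_getElem?
    intro j
    by_cases hj : j < k
    · rw [List.getElem?_take, if_pos hj]
      have hjlen : j < m * c.length := by omega
      rw [pv_flatten_replicate_getElem c m j hjlen, hclen]
      have hjns : j % (n * s) < n * s := Nat.mod_lt _ (by positivity)
      rw [hc, pv_flatMap_replicate_getElem f n s _ hjns]
      rw [List.getElem?_map, List.getElem?_range hj]
      simp only [Option.map_some]
      congr 1
      -- B's index: ((j // span) % n).toNat = j % (n*s) / s
      have hfd : PySem.Int.floordiv (j : Int) schedule_span = ((j / s : Nat) : Int) := by
        rw [show schedule_span = ((s : Nat) : Int) from by omega]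
        exact PySem.Int.floordiv_natCast j s
      have hmd : PySem.Int.mod ((j / s : Nat) : Int) (n : Int) = ((j / s % n : Nat) : Int) := PySem.Int.mod_natCast _ _
      rw [hfd, hmd]
      have harith : j % (n * s) / s = j / s % n := by
        rw [Nat.mul_comm n s]
        exact Nat.mod_mul_right_div_self j s n
      rw [harith]
      have hidx : j / s % n < n := Nat.mod_lt _ hn0
      rw [List.getD_eq_getElem?_getD, Int.toNat_natCast]
      rw [List.getElem?_map, List.getElem?_range hidx]
      simp
    · rw [List.getElem?_take, if_neg hj]
      rw [List.getElem?_map, List.getElem?_eq_none (by simpa using (by omega : k ≤ j))]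
      simp

-- ===== VERDICT (by name: the statement is the Claim_ definition above) =====
theorem build_overlap_cycle_schedule_spec : Claim_equal_build_overlap_cycle_schedule := by
  intro groups active_count step_count schedule_span _ hpre
  unfold Spec_build_overlap_cycle_schedule build_overlap_cycle_schedule build_overlap_cycle_schedule_alt
  by_cases h1 : groups = []
  · simp [h1]
  · rw [if_neg h1, if_neg h1]
    by_cases h2 : active_count ≥ (groups.length : Int)
    · rw [if_pos h2, if_pos h2]
    · rw [if_neg h2, if_neg h2]
      by_cases h3 : ((groups.length : Int) - active_count) ≠ 2
      · rw [if_pos h3, if_pos h3]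
      · rw [if_neg h3, if_neg h3]
        have hspan : 0 < schedule_span ∨ step_count ≤ 0 := by
          rcases hpre with h | h | ⟨_, h⟩
          · exact absurd h h1
          · exact absurd h (by omega)
          · exact h
        exact pv_main_branch groups step_count schedule_span _ h1 hspan
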